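-- pv_equiv track=rewrite | github.com/Syedsulthanskylimit/skycode_dev | form_generator/utils/dashboard_cases_api.py | _apply_column_search
-- ===== SOURCE A (Python) =====
-- def _apply_column_search(cases, params):
--     """
--     Apply column-specific filters to cases.
--     Best practice: use a mapping and iterate dynamically.
--     """
--     # Map query params -> case keys
--     column_mapping = {
--         "id": "id",
--         "process_name": "process_name",
--         "created_by": "created_by",
--         "updated_on": "updated_on",
--         "stages": "stages",
--     }
--
--     for param, case_field in column_mapping.items():
--         value = params.get(param)
--         if value:
--             value = str(value).strip().lower()
--             cases = [
--                 case for case in cases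
--                 if value in str(case.get(case_field, "")).lower()
--             ]
--
--     return cases
-- ===== SOURCE B (Python) =====
-- def _apply_column_search(cases, params):
--     column_mapping = {
--         "id": "id",
--         "process_name": "process_name",
--         "created_by": "created_by",
--         "updated_on": "updated_on",
--         "stages": "stages",
--     }
--     surviving = set(range(len(cases)))
--     for param, case_field in column_mapping.items():
--         value = params.get(param)
--         if value:
--             value = str(value).strip().lower()
--             surviving &= {
--                 i for i, case in enumerate(cases)
--                 if value in str(case.get(case_field, "")).lower()
--             }
--     return [cases[i] for i in sorted(surviving)]
-- ===== Notes on version B (the rewrite author's own statement) =====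
-- stated objective: alternative
-- what changed: B never rebuilds the case list: it starts from the index set range(len(cases)), intersects it with the set of matching row indices for each active filter, and finally materializes the survivors via sorted indices, instead of A's repeated rebuild of the case list per column.
import Mathlib
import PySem

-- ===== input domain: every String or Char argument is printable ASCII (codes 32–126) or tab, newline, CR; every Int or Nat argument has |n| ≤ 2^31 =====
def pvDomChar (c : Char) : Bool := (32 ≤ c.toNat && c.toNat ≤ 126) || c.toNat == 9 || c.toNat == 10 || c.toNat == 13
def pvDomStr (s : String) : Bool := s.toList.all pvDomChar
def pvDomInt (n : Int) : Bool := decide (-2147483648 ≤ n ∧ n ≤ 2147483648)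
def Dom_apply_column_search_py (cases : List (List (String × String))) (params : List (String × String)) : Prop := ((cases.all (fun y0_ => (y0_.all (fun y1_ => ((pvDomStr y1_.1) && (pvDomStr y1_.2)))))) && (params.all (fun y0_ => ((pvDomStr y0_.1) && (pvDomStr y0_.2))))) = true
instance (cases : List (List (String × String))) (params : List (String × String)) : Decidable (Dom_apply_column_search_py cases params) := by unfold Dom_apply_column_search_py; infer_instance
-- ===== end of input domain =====

-- B works on an index set instead of the case list: it intersects range(len(cases)) with the set of
-- matching row indices per active filter and reads the surviving cases back via sorted indices
-- (objective: alternative).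

-- the fixed column mapping, shared literal
def pvColumnMapping : List (String × String) :=
  [("id", "id"), ("process_name", "process_name"), ("created_by", "created_by"),
   ("updated_on", "updated_on"), ("stages", "stages")]

-- substring test 'value in str(case.get(field, "")).lower()'
def pvMatches (field value : String) (case_ : List (String × String)) : Bool :=
  PySem.Str.isIn value (PySem.Str.lower ((PySem.Dict.mk case_).getD field ""))

-- ===== PORT A =====
def apply_column_search_py (cases : List (List (String × String))) (params : List (String × String)) : List (List (String × String)) :=
  pvColumnMapping.foldl (fun cs pf =>
    match (PySem.Dict.mk params).get? pf.1 with
    | none => cs            -- value is None: falsy, skip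
    | some v =>
      if v == "" then cs    -- empty string: falsy, skip
      else
        let value := PySem.Str.lower (PySem.Str.strip v)
        cs.filter (fun case_ => pvMatches pf.2 value case_)) cases

-- ===== PORT B =====
-- '{i for i, case in enumerate(cases) if value in str(case.get(field, "")).lower()}'
def pvMatchIdx (cases : List (List (String × String))) (field value : String) : PySem.Set Int :=
  PySem.Set.ofList ((PySem.List.enumerate cases 0).filterMap
    (fun ic => if pvMatches field value ic.2 then some ic.1 else none))

def apply_column_search_py_alt (cases : List (List (String × String))) (params : List (String × String)) : List (List (String × String)) :=
  (PySem.List.sorted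
    (pvColumnMapping.foldl (fun S pf =>
      match (PySem.Dict.mk params).get? pf.1 with
      | none => S           -- value is None: falsy, skip
      | some v =>
        if v == "" then S   -- empty string: falsy, skip
        else
          let value := PySem.Str.lower (PySem.Str.strip v)
          PySem.Set.inter S (pvMatchIdx cases pf.2 value))
      (PySem.Set.ofList (PySem.List.pyRange 0 (cases.length : Int) 1)))
    (fun i => i) false).filterMap
    (fun i => PySem.List.pyGet? cases i)

-- ===== PRECONDITION & SPEC =====
def Spec_apply_column_search_py (cases : List (List (String × String))) (params : List (String × String)) (out : List (List (String × String))) : Prop := out = apply_column_search_py_alt cases params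
instance (cases : List (List (String × String))) (params : List (String × String)) (out : List (List (String × String))) : Decidable (Spec_apply_column_search_py cases params out) := by unfold Spec_apply_column_search_py; infer_instance

-- ===== CLAIM (what is proved, stated in full; the proofs are below) =====
def Claim_equal_apply_column_search_py : Prop := ∀ (cases : List (List (String × String))) (params : List (String × String)), Dom_apply_column_search_py cases params → Spec_apply_column_search_py cases params (apply_column_search_py cases params)

-- ===== LEMMAS AND PROOFS =====

-- A's sequence of per-column filters is one filter by the conjunction of the active tests.
theorem pv_foldl_filter_eq (params : List (String × String))
    (fs : List (String × String)) (cs : List (List (String × String))) :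
    fs.foldl (fun acc pf =>
        match (PySem.Dict.mk params).get? pf.1 with
        | none => acc
        | some v =>
          if v == "" then acc
          else
            let value := PySem.Str.lower (PySem.Str.strip v)
            acc.filter (fun case_ => pvMatches pf.2 value case_)) cs
      = cs.filter (fun case_ =>
          (fs.filterMap (fun pf =>
            match (PySem.Dict.mk params).get? pf.1 with
            | none => none
            | some v =>
              if v == "" then none
              else some (pf.2, PySem.Str.lower (PySem.Str.strip v)))).all
            (fun fv => pvMatches fv.1 fv.2 case_)) := by
  induction fs generalizing cs with
  | nil => simp
  | cons f fs ih =>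
    simp only [List.foldl_cons, List.filterMap_cons]
    cases hg : (PySem.Dict.mk params).get? f.1 with
    | none => exact ih cs
    | some v =>
      by_cases hv : v == ""
      · simp only [hg]; rw [if_pos hv, if_pos hv]; exact ih cs
      · simp only [hg]; rw [if_neg hv, if_neg hv]
        rw [ih, List.filter_filter]
        simp [Bool.and_comm]

-- B's sequence of set intersections is one filter (on the index list) by the same conjunction.
theorem pv_foldl_inter_eq (cases : List (List (String × String)))
    (params : List (String × String))
    (fs : List (String × String)) (S : List Int) :
    fs.foldl (fun S pf =>
        match (PySem.Dict.mk params).get? pf.1 with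
        | none => S
        | some v =>
          if v == "" then S
          else
            let value := PySem.Str.lower (PySem.Str.strip v)
            PySem.Set.inter S (pvMatchIdx cases pf.2 value)) S
      = S.filter (fun i =>
          (fs.filterMap (fun pf =>
            match (PySem.Dict.mk params).get? pf.1 with
            | none => none
            | some v =>
              if v == "" then none
              else some (pf.2, PySem.Str.lower (PySem.Str.strip v)))).all
            (fun fv => PySem.Set.contains (pvMatchIdx cases fv.1 fv.2) i)) := by
  induction fs generalizing S with
  | nil => simp
  | cons f fs ih =>
    simp only [List.foldl_cons, List.filterMap_cons]
    cases hg : (PySem.Dict.mk params).get? f.1 with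
    | none => exact ih S
    | some v =>
      by_cases hv : v == ""
      · simp only [hg]; rw [if_pos hv, if_pos hv]; exact ih S
      · simp only [hg]; rw [if_neg hv, if_neg hv]
        rw [ih]
        simp only [PySem.Set.inter, List.filter_filter]
        simp [Bool.and_comm]

-- membership in a match-index set, at an in-range natural index
theorem pv_contains_matchIdx (cases : List (List (String × String))) (f v : String)
    (k : Nat) (hk : k < cases.length) :
    PySem.Set.contains (pvMatchIdx cases f v) (k : Int) = pvMatches f v cases[k] := by
  have hmem : ((k : Int) ∈ pvMatchIdx cases f v) ↔ pvMatches f v cases[k] = true := by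
    unfold pvMatchIdx
    rw [PySem.Set.mem_ofList, List.mem_filterMap]
    constructor
    · rintro ⟨ic, hic, hif⟩
      rcases (PySem.List.mem_enumerate_iff _ _ _).1 hic with ⟨j, hj, rfl⟩
      by_cases hp : pvMatches f v cases[j] = true
      · simp only [hp, if_pos] at hif
        have hjk : j = k := by
          have : (j : Int) = (k : Int) := by simpa using hif
          exact_mod_cast this
        subst hjk; exact hp
      · simp [hp] at hif
    · intro hp
      exact ⟨(0 + (k : Int), cases[k]),
        (PySem.List.mem_enumerate_iff _ _ _).2 ⟨k, hk, rfl⟩, by simp [hp]⟩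
  by_cases hp : pvMatches f v cases[k] = true
  · rw [hp]; exact (PySem.Set.contains_iff _ _).2 (hmem.2 hp)
  · rw [Bool.eq_false_iff.2 hp, ← Bool.not_eq_true]
    intro hc; exact hp (hmem.1 ((PySem.Set.contains_iff _ _).1 hc))

-- reading a filtered index range back through the list is filtering the list
theorem pv_filterMap_pyGet?_filter {α : Type} (xs : List α) (q : Int → Bool) (p : α → Bool)
    (h : ∀ (k : Nat) (hk : k < xs.length), q (k : Int) = p xs[k]) :
    ((PySem.List.pyRange 0 (xs.length : Int) 1).filter q).filterMap
        (fun i => PySem.List.pyGet? xs i) = xs.filter p := by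
  induction xs using List.reverseRecOn with
  | nil => simp [PySem.List.pyRange_one_eq_nil]
  | append_singleton xs x ih =>
    have hlen : ((xs ++ [x]).length : Int) = (xs.length : Int) + 1 := by
      simp
    rw [hlen, PySem.List.pyRange_one_succ_right (by positivity),
        List.filter_append, List.filterMap_append]
    have hcg : ∀ i ∈ (PySem.List.pyRange 0 (xs.length : Int) 1).filter q,
        PySem.List.pyGet? (xs ++ [x]) i = PySem.List.pyGet? xs i := by
      intro i hi
      have hi' := List.mem_filter.1 hi
      have hrange := PySem.List.mem_pyRange_one.1 hi'.1
      obtain ⟨k, rfl⟩ : ∃ k : Nat, i = (k : Int) :=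
        ⟨i.toNat, (Int.toNat_of_nonneg hrange.1).symm⟩
      have hk : k < xs.length := by exact_mod_cast hrange.2
      rw [PySem.List.pyGet?_natCast, PySem.List.pyGet?_natCast,
          List.getElem?_append_left hk]
    rw [List.filterMap_congr hcg,
        ih (fun k hk => by
          have hh := h k (by simp; omega)
          rwa [List.getElem_append_left hk] at hh)]
    have hqx : q ((xs.length : Nat) : Int) = p x := by
      simpa using h xs.length (by simp)
    by_cases hp : p x = true
    · simp [hqx, hp, List.filter_append]
    · have hp' : p x = false := Bool.eq_false_iff.2 hp
      simp [hqx, hp', List.filter_append]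

-- ===== VERDICT (by name: the statement is the Claim_ definition above) =====
set_option maxHeartbeats 1000000 in
theorem apply_column_search_py_spec : Claim_equal_apply_column_search_py := by
  intro cases params _
  unfold Spec_apply_column_search_py apply_column_search_py apply_column_search_py_alt
  rw [pv_foldl_filter_eq params pvColumnMapping cases]
  rw [PySem.Set.ofList_eq_self_of_nodup _ (PySem.List.nodup_pyRange_one 0 _),
      pv_foldl_inter_eq cases params pvColumnMapping]
  have hpw : ((PySem.List.pyRange 0 (cases.length : Int) 1).filter
      (fun i => (pvColumnMapping.filterMap (fun pf =>
            match (PySem.Dict.mk params).get? pf.1 with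
            | none => none
            | some v =>
              if v == "" then none
              else some (pf.2, PySem.Str.lower (PySem.Str.strip v)))).all
        (fun fv => PySem.Set.contains (pvMatchIdx cases fv.1 fv.2) i))).Pairwise (· < ·) :=
    List.Pairwise.filter _ (PySem.List.pairwise_lt_pyRange_one 0 _)
  rw [PySem.List.sorted_eq_self_of_pairwise _ _ (hpw.imp (fun h => le_of_lt h))]
  have hq : ∀ (k : Nat) (hk : k < cases.length),
      (fun i : Int => (pvColumnMapping.filterMap (fun pf =>
            match (PySem.Dict.mk params).get? pf.1 with
            | none => none
            | some v =>
              if v == "" then none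
              else some (pf.2, PySem.Str.lower (PySem.Str.strip v)))).all
        (fun fv => PySem.Set.contains (pvMatchIdx cases fv.1 fv.2) i)) (k : Int)
      = (fun case_ => (pvColumnMapping.filterMap (fun pf =>
            match (PySem.Dict.mk params).get? pf.1 with
            | none => none
            | some v =>
              if v == "" then none
              else some (pf.2, PySem.Str.lower (PySem.Str.strip v)))).all
        (fun fv => pvMatches fv.1 fv.2 case_)) cases[k] :=
    fun k hk => List.all_congr rfl (fun fv => pv_contains_matchIdx cases fv.1 fv.2 k hk)
  exact (pv_filterMap_pyGet?_filter cases _ _ hq).symm
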